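-- pv_equiv track=rewrite | github.com/weirdapps/etorotrade | trade_modules/concentration_analyzer.py | _infer_region_from_ticker
-- ===== SOURCE A (Python) =====
-- def _infer_region_from_ticker(ticker: str) -> str:
--     """Infer region from ticker suffix."""
--     if not ticker:
--         return "unknown"
--
--     ticker = str(ticker).upper()
--
--     # Hong Kong
--     if ticker.endswith(".HK"):
--         return "HK"
--
--     # European markets
--     eu_suffixes = [
--         ".DE",
--         ".L",
--         ".PA",
--         ".AS",
--         ".MI",
--         ".MC",
--         ".SW",
--         ".ST",
--         ".OL",
--         ".CO",
--         ".HE",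
--         ".BR",
--         ".VI",
--     ]
--     for suffix in eu_suffixes:
--         if ticker.endswith(suffix):
--             return "EU"
--
--     # Default to US for unsuffixed tickers
--     return "US"
-- ===== SOURCE B (Python) =====
-- _REGION_BY_SUFFIX = {
--     ".HK": "HK",
--     ".DE": "EU", ".L": "EU", ".PA": "EU", ".AS": "EU", ".MI": "EU",
--     ".MC": "EU", ".SW": "EU", ".ST": "EU", ".OL": "EU", ".CO": "EU",
--     ".HE": "EU", ".BR": "EU", ".VI": "EU",
-- }
--
--
-- def _infer_region_from_ticker(ticker: str) -> str:
--     """Infer region from ticker suffix via one split and one table lookup."""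
--     if not ticker:
--         return "unknown"
--     ticker = str(ticker).upper()
--     _, dot, tail = ticker.rpartition(".")
--     if not dot:
--         return "US"
--     return _REGION_BY_SUFFIX.get("." + tail, "US")
-- ===== Notes on version B (the rewrite author's own statement) =====
-- stated objective: simpler
-- what changed: Replaces the special HK branch plus the endswith scan over thirteen EU suffixes with one rpartition that extracts the suffix after the last dot and a single table lookup in a suffix-to-region dict.
import Mathlib
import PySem

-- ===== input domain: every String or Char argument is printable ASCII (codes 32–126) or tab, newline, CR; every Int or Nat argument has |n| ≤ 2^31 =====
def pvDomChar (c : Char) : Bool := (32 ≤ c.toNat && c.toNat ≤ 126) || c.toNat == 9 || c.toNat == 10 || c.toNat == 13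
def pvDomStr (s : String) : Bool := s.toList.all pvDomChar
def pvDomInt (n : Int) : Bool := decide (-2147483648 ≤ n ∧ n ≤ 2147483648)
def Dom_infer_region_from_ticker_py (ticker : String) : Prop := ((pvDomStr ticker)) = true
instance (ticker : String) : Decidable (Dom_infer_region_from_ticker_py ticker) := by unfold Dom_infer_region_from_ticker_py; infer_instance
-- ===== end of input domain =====

-- B replaces A's HK branch plus the endswith scan over thirteen EU suffixes by one
-- "split off the part after the last dot" step and a single suffix-to-region table lookup (objective: simpler).


-- ===== PORT A =====
def euSuffixes : List String :=
  [".DE", ".L", ".PA", ".AS", ".MI", ".MC", ".SW", ".ST", ".OL", ".CO", ".HE", ".BR", ".VI"]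

-- the 'for suffix in eu_suffixes: if ticker.endswith(suffix): return "EU"' loop, with its fallthrough 'return "US"'
def euLoop (t : String) : List String → String
  | [] => "US"
  | s :: rest => if PySem.Str.endswith t s then "EU" else euLoop t rest

def infer_region_from_ticker_py (ticker : String) : String :=
  if ticker = "" then "unknown"
  else
    let t := PySem.Str.upper ticker
    if PySem.Str.endswith t ".HK" then "HK"
    else euLoop t euSuffixes

-- ===== PORT B =====
def regionBySuffix : List (String × String) :=
  [(".HK", "HK"),
   (".DE", "EU"), (".L", "EU"), (".PA", "EU"), (".AS", "EU"), (".MI", "EU"),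
   (".MC", "EU"), (".SW", "EU"), (".ST", "EU"), (".OL", "EU"), (".CO", "EU"),
   (".HE", "EU"), (".BR", "EU"), (".VI", "EU")]

-- dict.get(key, "US") on the association list (first match); Python string equality
-- is compared on the code-point lists (exact for str keys)
def regionLookup (key : List Char) : String :=
  ((regionBySuffix.find? (fun p => p.1.toList == key)).map Prod.snd).getD "US"

-- rpartition('.') ported by hand (exact on every string): the tail after the LAST '.' is the
-- reversed longest dot-free prefix of the reversed character list; 'dot' is empty iff '.' ∉ t
def infer_region_from_ticker_py_alt (ticker : String) : String :=
  if ticker = "" then "unknown"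
  else
    let t := (PySem.Str.upper ticker).toList
    if '.' ∈ t then
      let tail := (t.reverse.takeWhile (fun c => c != '.')).reverse
      regionLookup ('.' :: tail)
    else "US"

-- ===== PRECONDITION & SPEC =====
def Spec_infer_region_from_ticker_py (ticker : String) (out : String) : Prop := out = infer_region_from_ticker_py_alt ticker
instance (ticker : String) (out : String) : Decidable (Spec_infer_region_from_ticker_py ticker out) := by unfold Spec_infer_region_from_ticker_py; infer_instance

-- ===== CLAIM (what is proved, stated in full; the proofs are below) =====
def Claim_equal_infer_region_from_ticker_py : Prop := ∀ (ticker : String), Dom_infer_region_from_ticker_py ticker → Spec_infer_region_from_ticker_py ticker (infer_region_from_ticker_py ticker)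

-- ===== LEMMAS AND PROOFS =====

-- the longest dot-free prefix of r is p, followed by a dot, iff p ++ ['.'] is a prefix of r
theorem takeWhile_char (p r : List Char) (hp : ∀ c ∈ p, (c != '.') = true) :
    (p ++ ['.']) <+: r ↔ ('.' ∈ r ∧ r.takeWhile (fun c => c != '.') = p) := by
  constructor
  · rintro ⟨rest, hr⟩
    subst hr
    refine ⟨by simp, ?_⟩
    rw [List.append_assoc, List.takeWhile_append_of_pos hp]
    simp
  · rintro ⟨hdot, htw⟩
    have hsplit := List.takeWhile_append_dropWhile (p := fun c => c != '.') (l := r)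
    have hne : r.dropWhile (fun c => c != '.') ≠ [] := by
      intro h
      rw [← hsplit, h, List.append_nil] at hdot
      have := List.mem_takeWhile_imp hdot
      simp at this
    obtain ⟨a, l', hdw⟩ := List.exists_cons_of_ne_nil hne
    have ha : a = '.' := by
      have h := List.head_dropWhile_not (p := fun c => c != '.') (l := r) hne
      simp only [hdw, List.head_cons] at h
      simpa using h
    refine ⟨l', ?_⟩
    rw [List.append_assoc]
    rw [htw, hdw, ha] at hsplit
    simpa using hsplit

-- A's endswith test for a single-dot suffix, in terms of B's last-segment extraction
theorem endswith_dot (t : String) (p : List Char) (hp : ∀ c ∈ p, (c != '.') = true) :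
    PySem.Str.endswith t (String.ofList ('.' :: p)) = true ↔
      ('.' ∈ t.toList ∧ t.toList.reverse.takeWhile (fun c => c != '.') = p.reverse) := by
  rw [PySem.Str.endswith_eq, PySem.Chars.endswith_iff]
  have h1 : (String.ofList ('.' :: p)).toList = '.' :: p := by simp
  rw [h1, ← List.reverse_prefix]
  have h2 : ('.' :: p).reverse = p.reverse ++ ['.'] := by simp
  rw [h2, takeWhile_char _ _ (by intro c hc; exact hp c (List.mem_reverse.mp hc))]
  simp

-- ===== VERDICT (by name: the statement is the Claim_ definition above) =====
set_option maxHeartbeats 1000000 in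
set_option maxRecDepth 4096 in
theorem infer_region_from_ticker_py_spec : Claim_equal_infer_region_from_ticker_py := by
  intro ticker _
  unfold Spec_infer_region_from_ticker_py infer_region_from_ticker_py infer_region_from_ticker_py_alt
  by_cases h0 : ticker = ""
  · simp [h0]
  · simp only [h0, if_false]
    set t := PySem.Str.upper ticker with ht
    set x := t.toList.reverse.takeWhile (fun c => c != '.') with hx
    clear_value t x
    simp only [euLoop, euSuffixes, regionLookup, regionBySuffix, List.find?]
    rw [show (".HK" : String) = String.ofList ('.' :: ['H', 'K']) from rfl,
        show (".DE" : String) = String.ofList ('.' :: ['D', 'E']) from rfl,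
        show (".L" : String) = String.ofList ('.' :: ['L']) from rfl,
        show (".PA" : String) = String.ofList ('.' :: ['P', 'A']) from rfl,
        show (".AS" : String) = String.ofList ('.' :: ['A', 'S']) from rfl,
        show (".MI" : String) = String.ofList ('.' :: ['M', 'I']) from rfl,
        show (".MC" : String) = String.ofList ('.' :: ['M', 'C']) from rfl,
        show (".SW" : String) = String.ofList ('.' :: ['S', 'W']) from rfl,
        show (".ST" : String) = String.ofList ('.' :: ['S', 'T']) from rfl,
        show (".OL" : String) = String.ofList ('.' :: ['O', 'L']) from rfl,
        show (".CO" : String) = String.ofList ('.' :: ['C', 'O']) from rfl,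
        show (".HE" : String) = String.ofList ('.' :: ['H', 'E']) from rfl,
        show (".BR" : String) = String.ofList ('.' :: ['B', 'R']) from rfl,
        show (".VI" : String) = String.ofList ('.' :: ['V', 'I']) from rfl]
    simp only [String.toList_ofList]
    by_cases hdot : '.' ∈ t.toList
    · have E : ∀ (p : List Char), (∀ c ∈ p, (c != '.') = true) →
          ((PySem.Str.endswith t (String.ofList ('.' :: p)) = true) ↔ x.reverse = p) := by
        intro p hp
        rw [endswith_dot t p hp, ← hx]
        constructor
        · rintro ⟨_, h⟩; rw [h, List.reverse_reverse]
        · intro h; exact ⟨hdot, by rw [← h, List.reverse_reverse]⟩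
      have K : ∀ (p : List Char),
          ((('.' :: p : List Char) == ('.' :: x.reverse : List Char)) = decide (x.reverse = p)) := by
        intro p
        rw [Bool.eq_iff_iff, beq_iff_eq, decide_eq_true_iff]
        simp only [List.cons.injEq, true_and]
        exact eq_comm
      have e0 := E ['H', 'K'] (by simp)
      have e1 := E ['D', 'E'] (by simp)
      have e2 := E ['L'] (by simp)
      have e3 := E ['P', 'A'] (by simp)
      have e4 := E ['A', 'S'] (by simp)
      have e5 := E ['M', 'I'] (by simp)
      have e6 := E ['M', 'C'] (by simp)
      have e7 := E ['S', 'W'] (by simp)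
      have e8 := E ['S', 'T'] (by simp)
      have e9 := E ['O', 'L'] (by simp)
      have e10 := E ['C', 'O'] (by simp)
      have e11 := E ['H', 'E'] (by simp)
      have e12 := E ['B', 'R'] (by simp)
      have e13 := E ['V', 'I'] (by simp)
      have k0 := K ['H', 'K']
      have k1 := K ['D', 'E']
      have k2 := K ['L']
      have k3 := K ['P', 'A']
      have k4 := K ['A', 'S']
      have k5 := K ['M', 'I']
      have k6 := K ['M', 'C']
      have k7 := K ['S', 'W']
      have k8 := K ['S', 'T']
      have k9 := K ['O', 'L']
      have k10 := K ['C', 'O']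
      have k11 := K ['H', 'E']
      have k12 := K ['B', 'R']
      have k13 := K ['V', 'I']
      simp only [hdot, if_true]
      simp only [e0, e1, e2, e3, e4, e5, e6, e7, e8, e9, e10, e11, e12, e13,
                 k0, k1, k2, k3, k4, k5, k6, k7, k8, k9, k10, k11, k12, k13]
      by_cases h1 : x.reverse = ['H', 'K']
      · rw [if_pos h1, decide_eq_true h1]; rfl
      · rw [if_neg h1, decide_eq_false h1]
        by_cases h2 : x.reverse = ['D', 'E']
        · rw [if_pos h2, decide_eq_true h2]; rfl
        · rw [if_neg h2, decide_eq_false h2]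
          by_cases h3 : x.reverse = ['L']
          · rw [if_pos h3, decide_eq_true h3]; rfl
          · rw [if_neg h3, decide_eq_false h3]
            by_cases h4 : x.reverse = ['P', 'A']
            · rw [if_pos h4, decide_eq_true h4]; rfl
            · rw [if_neg h4, decide_eq_false h4]
              by_cases h5 : x.reverse = ['A', 'S']
              · rw [if_pos h5, decide_eq_true h5]; rfl
              · rw [if_neg h5, decide_eq_false h5]
                by_cases h6 : x.reverse = ['M', 'I']
                · rw [if_pos h6, decide_eq_true h6]; rfl
                · rw [if_neg h6, decide_eq_false h6]
                  by_cases h7 : x.reverse = ['M', 'C']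
                  · rw [if_pos h7, decide_eq_true h7]; rfl
                  · rw [if_neg h7, decide_eq_false h7]
                    by_cases h8 : x.reverse = ['S', 'W']
                    · rw [if_pos h8, decide_eq_true h8]; rfl
                    · rw [if_neg h8, decide_eq_false h8]
                      by_cases h9 : x.reverse = ['S', 'T']
                      · rw [if_pos h9, decide_eq_true h9]; rfl
                      · rw [if_neg h9, decide_eq_false h9]
                        by_cases h10 : x.reverse = ['O', 'L']
                        · rw [if_pos h10, decide_eq_true h10]; rfl
                        · rw [if_neg h10, decide_eq_false h10]
                          by_cases h11 : x.reverse = ['C', 'O']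
                          · rw [if_pos h11, decide_eq_true h11]; rfl
                          · rw [if_neg h11, decide_eq_false h11]
                            by_cases h12 : x.reverse = ['H', 'E']
                            · rw [if_pos h12, decide_eq_true h12]; rfl
                            · rw [if_neg h12, decide_eq_false h12]
                              by_cases h13 : x.reverse = ['B', 'R']
                              · rw [if_pos h13, decide_eq_true h13]; rfl
                              · rw [if_neg h13, decide_eq_false h13]
                                by_cases h14 : x.reverse = ['V', 'I']
                                · rw [if_pos h14, decide_eq_true h14]; rfl
                                · rw [if_neg h14, decide_eq_false h14]
                                  rfl
    · have hall : ∀ (p : List Char), (∀ c ∈ p, (c != '.') = true) →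
          PySem.Chars.endswith t.toList ('.' :: p) = false := by
        intro p hp
        have hb : PySem.Str.endswith t (String.ofList ('.' :: p)) =
            PySem.Chars.endswith t.toList ('.' :: p) := by simp
        rw [← hb, ← Bool.not_eq_true, endswith_dot t p hp]
        rintro ⟨h, _⟩; exact hdot h
      have f0 := hall ['H', 'K'] (by simp)
      have f1 := hall ['D', 'E'] (by simp)
      have f2 := hall ['L'] (by simp)
      have f3 := hall ['P', 'A'] (by simp)
      have f4 := hall ['A', 'S'] (by simp)
      have f5 := hall ['M', 'I'] (by simp)
      have f6 := hall ['M', 'C'] (by simp)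
      have f7 := hall ['S', 'W'] (by simp)
      have f8 := hall ['S', 'T'] (by simp)
      have f9 := hall ['O', 'L'] (by simp)
      have f10 := hall ['C', 'O'] (by simp)
      have f11 := hall ['H', 'E'] (by simp)
      have f12 := hall ['B', 'R'] (by simp)
      have f13 := hall ['V', 'I'] (by simp)
      simp [hdot, f0, f1, f2, f3, f4, f5, f6, f7, f8, f9, f10, f11, f12, f13]
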